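-- pv_equiv track=rewrite | github.com/SEGA-ABBASYA/Data-Mining | Data-Mining-Project.py | calculate_subsets_support
-- ===== SOURCE A (Python) =====
-- def count_itemset_support(itemset, transactions):
--     sup_count = 0
--     for transactions_items in transactions.values():
--         all_exist = True
--         for item in itemset:
--             found = False
--             for transactions_item in transactions_items:
--                 if item == transactions_item:
--                     found = True
--                     break
--             if not found:
--                 all_exist = False
--                 break
--         if all_exist:
--             sup_count += 1
--     return sup_count
--
-- def generate_subsets(itemset, index, current_subset, all_subsets):
--
--     if index == len(itemset):
--         if current_subset:
--             all_subsets.append(current_subset)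
--         return all_subsets
--
--     generate_subsets(itemset, index + 1, current_subset + [itemset[index]], all_subsets)
--
--     generate_subsets(itemset, index + 1, current_subset, all_subsets)
--
--     return all_subsets
--
-- def calculate_subsets_support(itemset, transactions):
--     support_res = []
--     subsets = generate_subsets(itemset, 0, [], [])
--     for subset in subsets:
--         if subset == itemset:
--             continue
--         subset_sup = count_itemset_support(subset, transactions)
--         support_res.append((subset, subset_sup))  # Return subset and its support
--
--     return support_res
-- ===== SOURCE B (Python) =====
-- def calculate_subsets_support(itemset, transactions):
--     n = len(itemset)
--     # One pass over transactions: for each, the set of itemset positions it contains.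
--     trans_idx = []
--     for items in transactions.values():
--         present = set(items)
--         trans_idx.append({i for i in range(n) if itemset[i] in present})
--     # Index subsets in include-first DFS order, built iteratively from the right.
--     idx_subsets = [[]]
--     for i in range(n - 1, -1, -1):
--         idx_subsets = [[i] + s for s in idx_subsets] + idx_subsets
--     res = []
--     for idxs in idx_subsets:
--         if len(idxs) == 0 or len(idxs) == n:
--             continue
--         cnt = sum(1 for tset in trans_idx if all(i in tset for i in idxs))
--         res.append(([itemset[i] for i in idxs], cnt))
--     return res
-- ===== Notes on version B (the rewrite author's own statement) =====
-- stated objective: faster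
-- what changed: B replaces A's recursive subset generation and per-subset rescans of every transaction's item list (string comparisons in a triple nested loop) by one pass over the transactions that records, per transaction, the set of itemset positions it contains, plus an iterative include-first subset construction; each subset's support is then counted by index-set lookups only.
import Mathlib
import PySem

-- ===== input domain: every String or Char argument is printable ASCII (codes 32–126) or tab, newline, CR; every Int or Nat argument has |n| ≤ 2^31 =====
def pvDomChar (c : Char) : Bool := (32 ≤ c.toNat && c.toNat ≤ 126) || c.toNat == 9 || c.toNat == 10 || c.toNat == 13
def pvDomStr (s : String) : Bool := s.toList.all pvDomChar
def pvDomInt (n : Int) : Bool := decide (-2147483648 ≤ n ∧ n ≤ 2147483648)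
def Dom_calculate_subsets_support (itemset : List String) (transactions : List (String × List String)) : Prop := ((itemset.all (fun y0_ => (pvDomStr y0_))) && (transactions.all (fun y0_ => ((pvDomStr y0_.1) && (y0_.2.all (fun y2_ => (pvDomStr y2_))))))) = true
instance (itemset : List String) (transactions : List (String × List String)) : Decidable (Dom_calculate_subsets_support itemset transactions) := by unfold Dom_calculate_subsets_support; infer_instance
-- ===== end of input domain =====

-- B replaces A's per-subset rescans of every transaction's item list by one pass that
-- records, per transaction, the set of itemset positions it contains, and an iterative
-- subset construction; equality of return values is proved below.

-- ===== PORT A =====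
-- count_itemset_support: the two inner loops (found / all_exist with break) are the
-- `any` / `all` combinators over the same lists.
def pvCountSupA (itemset : List String) (vals : List (List String)) : Int :=
  vals.foldl (fun sup items =>
    if itemset.all (fun item => items.any (fun t => t == item)) then sup + 1 else sup) 0

-- generate_subsets: A recurses on `index` into `itemset`, guarded by index == len(itemset);
-- ported with the remaining suffix itemset[index:] as the recursion argument (the index is
-- used only to read itemset[index] and to test the end).
def pvGenSubsetsA : List String → List String → List (List String) → List (List String)
  | [], cur, acc => if cur ≠ [] then acc ++ [cur] else acc
  | x :: rest, cur, acc => pvGenSubsetsA rest cur (pvGenSubsetsA rest (cur ++ [x]) acc)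

def calculate_subsets_support (itemset : List String) (transactions : List (String × List String)) : List (List String × Int) :=
  let vals := (PySem.Dict.ofList transactions).values   -- transactions.values()
  let subsets := pvGenSubsetsA itemset [] []
  subsets.foldl (fun res subset =>
    if subset == itemset then res
    else res ++ [(subset, pvCountSupA subset vals)]) []

-- ===== PORT B =====
-- per transaction: {i for i in range(n) if itemset[i] in present}; range(n) is distinct
-- and increasing, so the set comprehension is this filter.
def pvTransIdxB (itemset : List String) (vals : List (List String)) : List (List Nat) :=
  vals.foldl (fun acc items =>
    let present : PySem.Set String := PySem.Set.ofList items
    acc ++ [(List.range itemset.length).filter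
      (fun i => PySem.Set.contains present (itemset.getD i ""))]) []

-- idx_subsets = [[]]; for i in range(n-1, -1, -1): idx_subsets = [[i]+s for s in idx_subsets] + idx_subsets
def pvIdxSubsetsB (n : Nat) : List (List Nat) :=
  (List.range n).reverse.foldl (fun P i => P.map (fun s => i :: s) ++ P) [[]]

def calculate_subsets_support_alt (itemset : List String) (transactions : List (String × List String)) : List (List String × Int) :=
  let n := itemset.length
  let transIdx := pvTransIdxB itemset (PySem.Dict.ofList transactions).values
  (pvIdxSubsetsB n).foldl (fun res idxs =>
    if idxs.length = 0 ∨ idxs.length = n then res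
    else res ++ [(idxs.map (fun i => itemset.getD i ""),
      transIdx.foldl (fun c tset =>
        if idxs.all (fun i => PySem.Set.contains tset i) then c + 1 else c) (0 : Int))]) []

-- ===== PRECONDITION & SPEC =====
def Spec_calculate_subsets_support (itemset : List String) (transactions : List (String × List String)) (out : List (List String × Int)) : Prop := out = calculate_subsets_support_alt itemset transactions
instance (itemset : List String) (transactions : List (String × List String)) (out : List (List String × Int)) : Decidable (Spec_calculate_subsets_support itemset transactions out) := by unfold Spec_calculate_subsets_support; infer_instance

-- ===== CLAIM (what is proved, stated in full; the proofs are below) =====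
def Claim_equal_calculate_subsets_support : Prop := ∀ (itemset : List String) (transactions : List (String × List String)), Dom_calculate_subsets_support itemset transactions → Spec_calculate_subsets_support itemset transactions (calculate_subsets_support itemset transactions)

-- ===== LEMMAS AND PROOFS =====

-- reference enumeration: all subsequences in include-first depth-first order
def pvSubs {α : Type} : List α → List (List α)
  | [] => [[]]
  | x :: r => (pvSubs r).map (x :: ·) ++ pvSubs r

theorem pvSubs_sublist {α : Type} {l : List α} {s : List α} (h : s ∈ pvSubs l) : s.Sublist l := by
  induction l generalizing s with
  | nil => simp [pvSubs] at h; simp [h]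
  | cons x r ih =>
    simp only [pvSubs, List.mem_append, List.mem_map] at h
    rcases h with ⟨t, ht, rfl⟩ | h
    · exact (ih ht).cons₂ x
    · exact (ih h).cons x

theorem pvSubs_map {α β : Type} (f : α → β) (l : List α) :
    pvSubs (l.map f) = (pvSubs l).map (List.map f) := by
  induction l with
  | nil => rfl
  | cons x r ih =>
    simp only [List.map_cons, pvSubs, ih, List.map_append, List.map_map, Function.comp_def,
      List.map_cons]

theorem pvGenSubsetsA_eq (l : List String) : ∀ (cur : List String) (acc : List (List String)),
    pvGenSubsetsA l cur acc = acc ++ ((pvSubs l).map (cur ++ ·)).filter (fun s => s != []) := by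
  induction l with
  | nil =>
    intro cur acc
    by_cases h : cur = [] <;> simp [pvGenSubsetsA, pvSubs, h]
  | cons x r ih =>
    intro cur acc
    have hc : (fun s => cur ++ x :: s) = (fun s => (cur ++ [x]) ++ s) := by
      funext s; simp
    simp only [pvGenSubsetsA, ih, pvSubs, List.map_append, List.map_map,
      List.filter_append, List.append_assoc, Function.comp_def, hc]

theorem pvFoldrSubs (l : List Nat) :
    l.foldr (fun i P => P.map (i :: ·) ++ P) [[]] = pvSubs l := by
  induction l with
  | nil => rfl
  | cons x r ih => simp [pvSubs, ih]

theorem pvIdxSubsetsB_eq (n : Nat) : pvIdxSubsetsB n = pvSubs (List.range n) := by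
  unfold pvIdxSubsetsB
  rw [List.foldl_reverse]
  exact pvFoldrSubs _

theorem pvRangeMap_getD (l : List String) :
    (List.range l.length).map (fun i => l.getD i "") = l := by
  apply List.ext_getElem
  · simp
  · intro i h1 h2
    simp only [List.getElem_map, List.getElem_range]
    rw [List.getD_eq_getElem?_getD, List.getElem?_eq_getElem h2]
    rfl

-- the per-transaction membership bridge: testing the subset's items against the
-- transaction's item list equals testing its indices against the recorded index set
theorem pvCond_eq (itemset : List String) (items : List String) (idxs : List Nat)
    (hlt : ∀ i ∈ idxs, i < itemset.length) :
    (idxs.map (fun i => itemset.getD i "")).all (fun item => items.any (fun t => t == item))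
    = idxs.all (fun i => PySem.Set.contains
        ((List.range itemset.length).filter
          (fun j => PySem.Set.contains (PySem.Set.ofList items) (itemset.getD j ""))) i) := by
  apply Bool.coe_iff_coe.mp
  simp only [List.all_map, Function.comp_apply, List.all_eq_true]
  refine forall₂_congr ?_
  intro i hi
  rw [PySem.Set.contains_iff]
  simp only [List.mem_filter, List.mem_range, List.any_eq_true,
    PySem.Set.contains_iff, PySem.Set.mem_ofList, beq_iff_eq]
  constructor
  · rintro ⟨t, ht, rfl⟩; exact ⟨hlt i hi, ht⟩
  · rintro ⟨-, h⟩; exact ⟨_, h, rfl⟩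

theorem pvCount_eq (itemset : List String) (vals : List (List String)) (idxs : List Nat)
    (hlt : ∀ i ∈ idxs, i < itemset.length) :
    pvCountSupA (idxs.map (fun i => itemset.getD i "")) vals
    = (pvTransIdxB itemset vals).foldl (fun c tset =>
        if idxs.all (fun i => PySem.Set.contains tset i) then c + 1 else c) (0 : Int) := by
  unfold pvCountSupA pvTransIdxB
  rw [PySem.List.foldl_append_singleton_eq_map, List.nil_append, List.foldl_map]
  apply PySem.List.foldl_congr_mem
  intro acc items _
  rw [pvCond_eq itemset items idxs hlt]

-- ===== VERDICT (by name: the statement is the Claim_ definition above) =====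
theorem calculate_subsets_support_spec : Claim_equal_calculate_subsets_support := by
  intro itemset transactions _
  unfold Spec_calculate_subsets_support
  simp only [calculate_subsets_support, calculate_subsets_support_alt]
  set vals := (PySem.Dict.ofList transactions).values with hvals
  set n := itemset.length with hn
  -- A side: subsets list, then foldl as filter+map
  rw [pvGenSubsetsA_eq]
  have hA : (fun (res : List (List String × Int)) (subset : List String) =>
      if (subset == itemset) = true then res
        else res ++ [(subset, pvCountSupA subset vals)])
      = (fun res subset => if (subset != itemset) = true
          then res ++ [(subset, pvCountSupA subset vals)] else res) := by
    funext res subset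
    rcases h : subset == itemset <;> simp [bne, h]
  rw [hA, PySem.List.foldl_append_if]
  -- B side: idx subsets list, then foldl as filter+map
  have hB : (fun (res : List (List String × Int)) (idxs : List Nat) =>
      if idxs.length = 0 ∨ idxs.length = n then res
        else res ++ [(idxs.map (fun i => itemset.getD i ""),
          (pvTransIdxB itemset vals).foldl (fun c tset =>
            if idxs.all (fun i => PySem.Set.contains tset i) then c + 1 else c) (0 : Int))])
      = (fun res idxs => if ¬ (idxs.length = 0 ∨ idxs.length = n)
          then res ++ [(idxs.map (fun i => itemset.getD i ""),
            (pvTransIdxB itemset vals).foldl (fun c tset =>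
              if idxs.all (fun i => PySem.Set.contains tset i) then c + 1 else c) (0 : Int))]
          else res) := by
    funext res idxs
    by_cases h : idxs.length = 0 ∨ idxs.length = n
    · rw [if_pos h, if_neg (not_not_intro h)]
    · rw [if_neg h, if_pos h]
  rw [hB, PySem.List.foldl_append_ite, pvIdxSubsetsB_eq]
  -- rewrite A's subset list through the index enumeration
  have hsubs : pvSubs itemset = (pvSubs (List.range n)).map (List.map (fun i => itemset.getD i "")) := by
    rw [← pvSubs_map, hn, pvRangeMap_getD]
  simp only [List.nil_append, hsubs, List.map_map, List.filter_map, List.filter_filter,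
    Function.comp_def]
  -- same filter, same map, elementwise on members of pvSubs (range n)
  have hfil : ∀ idxs ∈ pvSubs (List.range n),
      ((idxs.map (fun i => itemset.getD i "") != itemset) &&
        (idxs.map (fun i => itemset.getD i "") != []))
      = decide (¬ (idxs.length = 0 ∨ idxs.length = n)) := by
    intro idxs hmem
    have hsub : idxs.Sublist (List.range n) := pvSubs_sublist hmem
    apply Bool.coe_iff_coe.mp
    simp only [Bool.and_eq_true, bne_iff_ne, ne_eq, decide_eq_true_eq,
      List.map_eq_nil_iff, not_or]
    constructor
    · rintro ⟨hne, hnil⟩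
      refine ⟨fun h0 => hnil (List.length_eq_zero_iff.mp h0), fun hlen => hne ?_⟩
      have hidx : idxs = List.range n := hsub.eq_of_length (by simpa using hlen)
      rw [hidx, hn, pvRangeMap_getD]
    · rintro ⟨h0, hne⟩
      refine ⟨fun h => hne ?_, fun h => h0 (List.length_eq_zero_iff.mpr h)⟩
      have := congrArg List.length h
      simpa [hn] using this
  rw [List.filter_congr hfil]
  apply List.map_congr_left
  intro idxs hmem
  have hsub : idxs.Sublist (List.range n) := pvSubs_sublist (List.mem_of_mem_filter hmem)
  have hlt : ∀ i ∈ idxs, i < itemset.length := by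
    intro i hi
    simpa [hn] using List.mem_range.mp (hsub.subset hi)
  rw [pvCount_eq itemset vals idxs hlt]
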